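-- pv_equiv track=rewrite | github.com/miladesmet/VISI401 | BurrowWheeler.py | count_occurences
-- ===== SOURCE A (Python) =====
-- from collections import Counter
--
-- def count_occurences(string):
--
--     #Initialisation du compteur et du resultat
--     count = 0
--     result = {}
--
--     # recupération de l'alphabet
--     alphabet = set(string)
--
--
--     # init du compteur
--     c = Counter(string)
--     # Ex pour apple :Counter({'p': 2, 'a': 1, 'l': 1, 'e': 1})
--
--     #Pour chaque lettre de l'alphabet on recuperer
--     # le nombre d'occurences et on le met dans res
--     for letter in sorted(alphabet):
--         result[letter] = count
--         count += c[letter]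
--     return result
-- ===== SOURCE B (Python) =====
-- def count_occurences(string):
--     result = {}
--     for i, ch in enumerate(sorted(string)):
--         if ch not in result:
--             result[ch] = i
--     return result
-- ===== Notes on version B (the rewrite author's own statement) =====
-- stated objective: alternative
-- what changed: Replaced the Counter + cumulative-sum loop over sorted(set(string)) by a single enumerate scan of sorted(string) that records each character's first index in the sorted string.
import Mathlib
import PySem

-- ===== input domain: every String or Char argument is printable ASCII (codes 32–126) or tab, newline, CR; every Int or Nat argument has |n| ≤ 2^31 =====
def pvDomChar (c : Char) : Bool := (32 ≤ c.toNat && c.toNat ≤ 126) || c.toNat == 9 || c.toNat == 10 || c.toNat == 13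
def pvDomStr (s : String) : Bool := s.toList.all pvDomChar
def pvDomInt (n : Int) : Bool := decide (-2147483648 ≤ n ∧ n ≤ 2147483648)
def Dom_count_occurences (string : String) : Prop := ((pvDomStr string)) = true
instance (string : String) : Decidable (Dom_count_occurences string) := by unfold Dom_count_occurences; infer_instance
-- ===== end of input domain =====

-- B replaces the Counter + cumulative-sum loop over sorted(set(string)) by a single
-- enumerate scan of sorted(string) recording each character's first index (objective: alternative).

-- ===== PORT A =====
def count_occurences (string : String) : List (String × Int) :=
  let alphabet : PySem.Set Char := PySem.Set.ofList string.toList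
  let c : PySem.Dict Char Int := PySem.Dict.counter string.toList
  let st := (PySem.List.sorted alphabet (fun x => x) false).foldl
      (fun (st : Int × PySem.Dict Char Int) letter =>
        (st.1 + c.getD letter 0, st.2.insert letter st.1))
      ((0 : Int), PySem.Dict.empty)
  st.2.items.map (fun p => (String.singleton p.1, p.2))

-- ===== PORT B =====
def count_occurences_alt (string : String) : List (String × Int) :=
  let res := (PySem.List.enumerate (PySem.List.sorted string.toList (fun x => x) false) 0).foldl
      (fun (r : PySem.Dict Char Int) p => if r.contains p.2 then r else r.insert p.2 p.1)
      PySem.Dict.empty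
  res.items.map (fun p => (String.singleton p.1, p.2))

-- ===== PRECONDITION & SPEC =====
def Spec_count_occurences (string : String) (out : List (String × Int)) : Prop := out = count_occurences_alt string
instance (string : String) (out : List (String × Int)) : Decidable (Spec_count_occurences string out) := by unfold Spec_count_occurences; infer_instance

-- ===== CLAIM (what is proved, stated in full; the proofs are below) =====
def Claim_equal_count_occurences : Prop := ∀ (string : String), Dom_count_occurences string → Spec_count_occurences string (count_occurences string)

-- ===== LEMMAS AND PROOFS =====

-- common shape of both results: letters of ds paired with cumulative counts taken in l
def pvFspec (l : List Char) : List Char → Int → List (Char × Int)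
  | [], _ => []
  | c :: t, n => (c, n) :: pvFspec l t (n + l.count c)

theorem pvFspec_congr (l₁ l₂ : List Char) (ds : List Char)
    (h : ∀ x ∈ ds, l₁.count x = l₂.count x) : ∀ n, pvFspec l₁ ds n = pvFspec l₂ ds n := by
  induction ds with
  | nil => intro n; rfl
  | cons c t ih =>
      intro n
      simp only [pvFspec, h c (by simp)]
      exact congrArg _ (ih (fun x hx => h x (by simp [hx])) _)

theorem pvLemA (l ds : List Char) :
    ∀ (n : Int) (d : PySem.Dict Char Int), ds.Nodup → (∀ x ∈ ds, d.contains x = false) →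
    ((ds.foldl (fun (st : Int × PySem.Dict Char Int) letter =>
        (st.1 + (PySem.Dict.counter l).getD letter 0, st.2.insert letter st.1)) (n, d)).2).items
      = d.items ++ pvFspec l ds n := by
  induction ds with
  | nil => intro n d _ _; simp [pvFspec]
  | cons c t ih =>
      intro n d hnd hfree
      simp only [List.foldl_cons]
      rw [ih (n + (PySem.Dict.counter l).getD c 0) (d.insert c n)
            (List.Nodup.of_cons hnd)
            (by
              intro x hx
              rw [PySem.Dict.contains_insert]
              have hxc : x ≠ c := by
                rintro rfl; exact (List.nodup_cons.mp hnd).1 hx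
              simp [hxc, hfree x (by simp [hx])])]
      rw [PySem.Dict.items_insert_of_not_contains _ _ (hfree c (by simp))]
      simp [pvFspec, PySem.Dict.getD_counter]

-- a sorted list with minimum c splits into its block of c's and the rest
theorem pvSplit (c : Char) : ∀ s : List Char, s.Pairwise (· ≤ ·) → (∀ x ∈ s, c ≤ x) →
    s = List.replicate (s.count c) c ++ s.filter (fun x => !(x == c)) := by
  intro s
  induction s with
  | nil => intro _ _; rfl
  | cons x rest ih =>
      intro hs hmin
      by_cases hxc : x = c
      · subst hxc
        have := ih (hs.of_cons) (fun y hy => hmin y (by simp [hy]))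
        simp only [List.count_cons_self, List.filter_cons]
        simp only [beq_self_eq_true, Bool.not_true, List.replicate_succ]
        exact congrArg (x :: ·) this
      · have hcx : c < x := lt_of_le_of_ne (hmin x (by simp)) (fun h => hxc h.symm)
        have hnot : c ∉ x :: rest := by
          intro hc
          rcases List.mem_cons.mp hc with h | h
          · exact hxc h.symm
          · exact absurd ((List.pairwise_cons.mp hs).1 c h) (not_le.mpr hcx)
        have hcount : (x :: rest).count c = 0 := List.count_eq_zero.mpr hnot
        have hfilter : (x :: rest).filter (fun y => !(y == c)) = x :: rest := by
          apply List.filter_eq_self.mpr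
          intro y hy
          have hyc : y ≠ c := fun h => hnot (h ▸ hy)
          simp [hyc]
        rw [hcount, hfilter]; rfl

theorem pvFoldSkip (c : Char) (bstep : PySem.Dict Char Int → Int × Char → PySem.Dict Char Int)
    (hb : bstep = fun r p => if r.contains p.2 then r else r.insert p.2 p.1) :
    ∀ (k : Nat) (n : Int) (d : PySem.Dict Char Int), d.contains c = true →
    (PySem.List.enumerate (List.replicate k c) n).foldl bstep d = d := by
  intro k
  induction k with
  | zero => intro n d _; simp
  | succ m ih =>
      intro n d hd
      rw [List.replicate_succ, PySem.List.enumerate_cons, List.foldl_cons, hb]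
      simp only [hd, if_true]
      rw [← hb]; exact ih (n + 1) d hd

theorem pvLemB (ds : List Char) : ∀ (s : List Char) (n : Int) (d : PySem.Dict Char Int),
    ds.Pairwise (· < ·) → s.Pairwise (· ≤ ·) → (∀ x, x ∈ s ↔ x ∈ ds) →
    (∀ x ∈ s, d.contains x = false) →
    ((PySem.List.enumerate s n).foldl
        (fun (r : PySem.Dict Char Int) p => if r.contains p.2 then r else r.insert p.2 p.1) d).items
      = d.items ++ pvFspec s ds n := by
  induction ds with
  | nil =>
      intro s n d _ _ hmem _
      have : s = [] := by
        cases s with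
        | nil => rfl
        | cons a t => exact absurd ((hmem a).mp (by simp)) (by simp)
      subst this; simp [pvFspec]
  | cons c t ih =>
      intro s n d hds hs hmem hfree
      have hct : ∀ x ∈ t, c < x := (List.pairwise_cons.mp hds).1
      have hmin : ∀ x ∈ s, c ≤ x := by
        intro x hx
        rcases List.mem_cons.mp ((hmem x).mp hx) with h | h
        · exact le_of_eq h.symm
        · exact le_of_lt (hct x h)
      have hcs : c ∈ s := (hmem c).mpr (by simp)
      have hsplit := pvSplit c s hs hmin
      set k := s.count c with hk
      have hkpos : 0 < k := List.count_pos_iff.mpr hcs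
      set s₂ := s.filter (fun x => !(x == c)) with hs₂
      -- decompose: the c-block then the rest
      have hrep : List.replicate k c = c :: List.replicate (k - 1) c := by
        rw [← List.replicate_succ]
        congr 1
        omega
      conv_lhs => rw [hsplit, hrep, PySem.List.enumerate_append,
          PySem.List.enumerate_cons, List.foldl_append, List.foldl_cons]
      simp only [hfree c hcs, Bool.false_eq_true, if_false, List.length_cons,
        List.length_replicate]
      have hk1 : k - 1 + 1 = k := by omega
      rw [hk1]
      rw [pvFoldSkip c _ rfl (k - 1) (n + 1) (d.insert c n) (by simp)]
      have hmem₂ : ∀ x, x ∈ s₂ ↔ x ∈ t := by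
        intro x
        constructor
        · intro hx
          have := List.mem_filter.mp hx
          have hxc : x ≠ c := by simpa using this.2
          rcases List.mem_cons.mp ((hmem x).mp this.1) with h | h
          · exact absurd h hxc
          · exact h
        · intro hx
          refine List.mem_filter.mpr ⟨(hmem x).mpr (by simp [hx]), ?_⟩
          have := ne_of_gt (hct x hx)
          simpa using this
      have hfree₂ : ∀ x ∈ s₂, (d.insert c n).contains x = false := by
        intro x hx
        have hxc : x ≠ c := by simpa using (List.mem_filter.mp hx).2
        rw [PySem.Dict.contains_insert]
        simp [hxc, hfree x (List.mem_of_mem_filter hx)]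
      rw [ih s₂ (n + (k : Int)) (d.insert c n)
            hds.of_cons (hs.filter _) hmem₂ hfree₂]
      rw [PySem.Dict.items_insert_of_not_contains _ _ (hfree c hcs)]
      have hcnt : ∀ x ∈ t, s₂.count x = s.count x := by
        intro x hx
        have hxc : x ≠ c := ne_of_gt (hct x hx)
        conv_rhs => rw [hsplit]
        rw [List.count_append, List.count_replicate]
        simp [Ne.symm hxc]
      simp only [pvFspec, ← hk]
      rw [pvFspec_congr s₂ s t hcnt]
      simp

-- ===== VERDICT (by name: the statement is the Claim_ definition above) =====
theorem count_occurences_spec : Claim_equal_count_occurences := by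
  intro string _
  unfold Spec_count_occurences count_occurences count_occurences_alt
  set l := string.toList with hl
  set ds := PySem.List.sorted (PySem.Set.ofList l) (fun x => x) false with hds
  set s := PySem.List.sorted l (fun x => x) false with hs
  have hdslt : ds.Pairwise (· < ·) := PySem.List.sorted_ofList_pairwise_lt l
  have hsle : s.Pairwise (· ≤ ·) := PySem.List.sorted_pairwise l (fun x => x) 
  have hmem : ∀ x, x ∈ s ↔ x ∈ ds := by
    intro x
    rw [hs, hds, PySem.List.mem_sorted, PySem.List.mem_sorted, PySem.Set.mem_ofList]
  have hA := pvLemA l ds 0 PySem.Dict.empty hdslt.nodup (by intro x _; simp)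
  have hB := pvLemB ds s 0 PySem.Dict.empty hdslt hsle hmem (by intro x _; simp)
  simp only []
  rw [hA, hB]
  have hcnt : ∀ x ∈ ds, s.count x = l.count x := by
    intro x _
    exact (PySem.List.sorted_perm l (fun x => x) false).count_eq x
  rw [pvFspec_congr s l ds hcnt]
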